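-- pv_equiv track=rewrite | github.com/kkratos/leetcode | evenNumberBeforeFixed.py | evenNumbersBeforeFixed
-- ===== SOURCE A (Python) =====
-- def evenNumbersBeforeFixed(sequence, fixedElement):
--     ctr = 0
--
--     for i in sequence:
--
--         if i == fixedElement:
--             return ctr
--         if i % 2 == 0:
--             ctr += 1
--     return -1
-- ===== SOURCE B (Python) =====
-- def evenNumbersBeforeFixed(sequence, fixedElement):
--     if fixedElement not in sequence:
--         return -1
--     idx = sequence.index(fixedElement)
--     return sum(1 for x in sequence[:idx] if x % 2 == 0)
-- ===== Notes on version B (the rewrite author's own statement) =====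
-- stated objective: idiomatic
-- what changed: Replaces the single running-counter loop with two phases: locate the first occurrence via list.index (guarded by a membership test) and then count evens in the prefix slice with a generator sum.
import Mathlib
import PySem

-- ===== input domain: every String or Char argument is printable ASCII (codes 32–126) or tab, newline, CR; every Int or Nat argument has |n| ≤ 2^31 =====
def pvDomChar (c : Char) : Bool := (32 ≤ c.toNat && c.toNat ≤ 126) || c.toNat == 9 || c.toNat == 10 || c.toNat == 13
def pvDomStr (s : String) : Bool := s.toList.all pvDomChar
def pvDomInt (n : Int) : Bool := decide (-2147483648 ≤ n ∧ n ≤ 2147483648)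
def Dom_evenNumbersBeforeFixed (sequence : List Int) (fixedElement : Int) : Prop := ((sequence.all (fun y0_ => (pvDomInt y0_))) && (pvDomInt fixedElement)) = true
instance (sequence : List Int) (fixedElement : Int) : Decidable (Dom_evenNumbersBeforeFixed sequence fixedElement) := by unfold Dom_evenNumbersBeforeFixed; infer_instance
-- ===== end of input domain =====

-- B restructures A's interleaved counter loop into two phases: find the first index of
-- fixedElement, then count evens in the prefix slice (idiomatic; same O(n) cost).

-- ===== PORT A =====
-- the for-loop with its running counter and early return
def evenNumbersBeforeFixedGo (sequence : List Int) (fixedElement : Int) (ctr : Int) : Int :=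
  match sequence with
  | [] => -1
  | i :: rest =>
    if i == fixedElement then ctr
    else evenNumbersBeforeFixedGo rest fixedElement
      (if PySem.Int.mod i 2 == 0 then ctr + 1 else ctr)

def evenNumbersBeforeFixed (sequence : List Int) (fixedElement : Int) : Int :=
  evenNumbersBeforeFixedGo sequence fixedElement 0

-- ===== PORT B =====
def evenNumbersBeforeFixed_alt (sequence : List Int) (fixedElement : Int) : Int :=
  match PySem.List.index? sequence fixedElement with
  | none => -1          -- 'if fixedElement not in sequence: return -1'
  | some idx =>         -- idx = sequence.index(fixedElement)
    -- sum(1 for x in sequence[:idx] if x % 2 == 0)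
    ((PySem.List.slice sequence none (some (idx : Int))).countP
      (fun x => PySem.Int.mod x 2 == 0) : Int)

-- ===== PRECONDITION & SPEC =====
def Spec_evenNumbersBeforeFixed (sequence : List Int) (fixedElement : Int) (out : Int) : Prop := out = evenNumbersBeforeFixed_alt sequence fixedElement
instance (sequence : List Int) (fixedElement : Int) (out : Int) : Decidable (Spec_evenNumbersBeforeFixed sequence fixedElement out) := by unfold Spec_evenNumbersBeforeFixed; infer_instance

-- ===== CLAIM (what is proved, stated in full; the proofs are below) =====
def Claim_equal_evenNumbersBeforeFixed : Prop := ∀ (sequence : List Int) (fixedElement : Int), Dom_evenNumbersBeforeFixed sequence fixedElement → Spec_evenNumbersBeforeFixed sequence fixedElement (evenNumbersBeforeFixed sequence fixedElement)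

-- ===== LEMMAS AND PROOFS =====

-- The loop with accumulator ctr computes: -1 if absent, else ctr + (#evens before first hit).
theorem evenNumbersBeforeFixedGo_eq (sequence : List Int) (fixedElement : Int) :
    ∀ ctr : Int, evenNumbersBeforeFixedGo sequence fixedElement ctr =
      match PySem.List.index? sequence fixedElement with
      | none => -1
      | some k => ctr + ((sequence.take k).countP (fun x => PySem.Int.mod x 2 == 0) : Int) := by
  induction sequence with
  | nil => intro ctr; simp [evenNumbersBeforeFixedGo, PySem.List.index?]
  | cons i rest ih =>
    intro ctr
    by_cases h : i = fixedElement
    · subst h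
      rw [evenNumbersBeforeFixedGo, PySem.List.index?_cons_self]
      simp
    · rw [evenNumbersBeforeFixedGo, PySem.List.index?_cons_of_ne]
      rw [if_neg (by simpa using h), ih]
      cases hk : PySem.List.index? rest fixedElement with
      | none => simp
      | some k =>
        simp only [Option.map_some, List.take_succ_cons, List.countP_cons]
        simp
        split_ifs <;> ring
      · exact h

theorem evenNumbersBeforeFixed_spec : Claim_equal_evenNumbersBeforeFixed := by
  intro sequence fixedElement _
  unfold Spec_evenNumbersBeforeFixed evenNumbersBeforeFixed evenNumbersBeforeFixed_alt
  rw [evenNumbersBeforeFixedGo_eq]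
  cases hk : PySem.List.index? sequence fixedElement with
  | none => simp
  | some k => simp [PySem.List.slice_to_natCast]
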